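-- pv_equiv track=rewrite | github.com/JLanghamLopez/ts_bench | src/ts_bench/agents/benchmark_agent.py | parse_tasks_from_message
-- ===== SOURCE A (Python) =====
-- from typing import Dict, List
--
-- def parse_tasks_from_message(message: str) -> List[Dict]:
--     """
--     Extract task_id and data_url from the assignment message text.
--     """
--     tasks = []
--     current = {}
--
--     for line in message.split("\n"):
--         line = line.strip()
--
--         if line.startswith("- **Task ID**:"):
--             current["task_id"] = line.split(":")[1].strip()
--         elif line.startswith("- **Data URL**:"):
--             current["data_url"] = line.split(": ")[1].strip()
--         elif line.startswith("### Task"):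
--             # New task, push previous
--             if current:
--                 tasks.append(current)
--             current = {}
--
--     if current:
--         tasks.append(current)
--
--     return tasks
-- ===== SOURCE B (Python) =====
-- def _parse_segment(lines):
--     d = {}
--     for line in lines:
--         if line.startswith("- **Task ID**:"):
--             d["task_id"] = line.split(":")[1].strip()
--         elif line.startswith("- **Data URL**:"):
--             d["data_url"] = line.split(": ")[1].strip()
--     return d
--
--
-- def parse_tasks_from_message(message):
--     """Two-stage: cut the stripped lines into segments at '### Task' headers, then parse each segment."""
--     segments = []
--     current = []
--     for raw in message.split("\n"):
--         line = raw.strip()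
--         if line.startswith("### Task"):
--             segments.append(current)
--             current = []
--         else:
--             current.append(line)
--     segments.append(current)
--     return [d for d in map(_parse_segment, segments) if d]
-- ===== Notes on version B (the rewrite author's own statement) =====
-- stated objective: alternative
-- what changed: Replaces A's streaming flush state machine (one dict built while scanning, pushed on each '### Task' header) by a two-stage decomposition: first cut the stripped lines into segments at the headers, then parse each segment into a dict and keep the non-empty ones.
-- outside the precondition, e.g. on parse_tasks_from_message('- **Data URL**:'): A raises IndexError, B raises IndexError
import Mathlib
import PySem

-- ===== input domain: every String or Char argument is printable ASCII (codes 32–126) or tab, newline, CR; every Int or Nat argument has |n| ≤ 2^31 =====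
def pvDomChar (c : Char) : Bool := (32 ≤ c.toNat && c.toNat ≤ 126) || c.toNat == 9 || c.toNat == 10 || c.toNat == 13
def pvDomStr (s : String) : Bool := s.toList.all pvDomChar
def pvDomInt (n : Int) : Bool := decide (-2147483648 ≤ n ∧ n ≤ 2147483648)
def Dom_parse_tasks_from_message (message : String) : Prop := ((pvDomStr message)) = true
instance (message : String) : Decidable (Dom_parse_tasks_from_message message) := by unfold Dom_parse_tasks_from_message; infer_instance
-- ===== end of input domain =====

-- B replaces A's streaming flush state machine by a two-stage shape (cut into segments at '### Task'
-- headers, then parse each segment to a dict); objective: alternative decomposition, same O(n) cost.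

-- ===== PORT A =====
-- streaming loop state: (tasks so far, current dict); line.split(...)[1] is totalized with
-- pyGetD "" — Pre_ excludes the one input shape where Python's [1] raises IndexError.
def pvStepA (st : List (PySem.Dict String String) × PySem.Dict String String) (raw : String) :
    List (PySem.Dict String String) × PySem.Dict String String :=
  let line := PySem.Str.strip raw
  if PySem.Str.startswith line "- **Task ID**:" then
    (st.1, st.2.insert "task_id" (PySem.Str.strip (PySem.List.pyGetD ((PySem.Str.split? line ":").getD []) 1 "")))
  else if PySem.Str.startswith line "- **Data URL**:" then
    (st.1, st.2.insert "data_url" (PySem.Str.strip (PySem.List.pyGetD ((PySem.Str.split? line ": ").getD []) 1 "")))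
  else if PySem.Str.startswith line "### Task" then
    (if st.2.items ≠ [] then st.1 ++ [st.2] else st.1, PySem.Dict.empty)
  else st

def pvFinishA (st : List (PySem.Dict String String) × PySem.Dict String String) :
    List (List (String × String)) :=
  (if st.2.items ≠ [] then st.1 ++ [st.2] else st.1).map (·.items)

def parse_tasks_from_message (message : String) : List (List (String × String)) :=
  pvFinishA (((PySem.Str.split? message "\n").getD []).foldl pvStepA ([], PySem.Dict.empty))

-- ===== PORT B =====
def pvFieldB (d : PySem.Dict String String) (line : String) : PySem.Dict String String :=
  if PySem.Str.startswith line "- **Task ID**:" then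
    d.insert "task_id" (PySem.Str.strip (PySem.List.pyGetD ((PySem.Str.split? line ":").getD []) 1 ""))
  else if PySem.Str.startswith line "- **Data URL**:" then
    d.insert "data_url" (PySem.Str.strip (PySem.List.pyGetD ((PySem.Str.split? line ": ").getD []) 1 ""))
  else d

def pvParseSegB (seg : List String) : PySem.Dict String String :=
  seg.foldl pvFieldB PySem.Dict.empty

def pvStepB (st : List (List String) × List String) (raw : String) :
    List (List String) × List String :=
  let line := PySem.Str.strip raw
  if PySem.Str.startswith line "### Task" then (st.1 ++ [st.2], [])
  else (st.1, st.2 ++ [line])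

def pvFinishB (st : List (List String) × List String) : List (List (String × String)) :=
  ((((st.1 ++ [st.2]).map pvParseSegB).filter (fun d => decide (d.items ≠ []))).map (·.items))

def parse_tasks_from_message_alt (message : String) : List (List (String × String)) :=
  pvFinishB (((PySem.Str.split? message "\n").getD []).foldl pvStepB ([], []))

-- ===== PRECONDITION & SPEC =====
-- Pre_ excludes exactly the inputs where Python A raises IndexError: a (stripped) line that starts
-- with '- **Data URL**:' but contains no ': ', so line.split(': ')[1] is out of range. (B raises there too.)
def Pre_parse_tasks_from_message (message : String) : Prop :=
  ∀ raw ∈ (PySem.Str.split? message "\n").getD [],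
    PySem.Str.startswith (PySem.Str.strip raw) "- **Data URL**:" = true →
    2 ≤ ((PySem.Str.split? (PySem.Str.strip raw) ": ").getD []).length
instance (message : String) : Decidable (Pre_parse_tasks_from_message message) := by
  unfold Pre_parse_tasks_from_message; infer_instance

def pvWitness_parse_tasks_from_message : String :=
  "### Task 1\n- **Task ID**: t1\n- **Data URL**: http://x\n### Task 2\n- **Task ID**: t2"

def Spec_parse_tasks_from_message (message : String) (out : List (List (String × String))) : Prop := out = parse_tasks_from_message_alt message
instance (message : String) (out : List (List (String × String))) : Decidable (Spec_parse_tasks_from_message message out) := by unfold Spec_parse_tasks_from_message; infer_instance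

-- ===== CLAIM (what is proved, stated in full; the proofs are below) =====
def Claim_equal_parse_tasks_from_message : Prop := ∀ (message : String), Dom_parse_tasks_from_message message → Pre_parse_tasks_from_message message → Spec_parse_tasks_from_message message (parse_tasks_from_message message)

-- ===== LEMMAS AND PROOFS =====

-- structural segmentation of the (stripped) lines, recursion on the line list
def pvConsFirst (x : List String) : List (List String) → List (List String)
  | [] => [x]
  | s :: ss => (x ++ s) :: ss

def pvSegRec : List String → List (List String)
  | [] => [[]]
  | raw :: ls =>
    if PySem.Str.startswith (PySem.Str.strip raw) "### Task" then [] :: pvSegRec ls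
    else pvConsFirst [PySem.Str.strip raw] (pvSegRec ls)

def pvMapFirst (cur : PySem.Dict String String) : List (List String) → List (PySem.Dict String String)
  | [] => [cur]
  | s :: ss => s.foldl pvFieldB cur :: ss.map pvParseSegB

theorem pvSegRec_ne_nil (ls : List String) : pvSegRec ls ≠ [] := by
  cases ls with
  | nil => simp [pvSegRec]
  | cons raw ls =>
    simp only [pvSegRec]
    split
    · simp
    · cases h : pvSegRec ls <;> simp [pvConsFirst]

-- the three branch prefixes are mutually exclusive (different first characters)
theorem pv_excl_taskid (s : String)
    (h : PySem.Str.startswith s "- **Task ID**:" = true) :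
    PySem.Str.startswith s "### Task" = false := by
  by_contra hc
  rw [Bool.not_eq_false] at hc
  rw [PySem.Str.startswith_eq, PySem.Chars.startswith_iff] at h hc
  rcases h with ⟨t, ht⟩
  rcases hc with ⟨u, hu⟩
  have h2 := ht.trans hu.symm
  simp at h2

theorem pv_excl_dataurl (s : String)
    (h : PySem.Str.startswith s "- **Data URL**:" = true) :
    PySem.Str.startswith s "### Task" = false := by
  by_contra hc
  rw [Bool.not_eq_false] at hc
  rw [PySem.Str.startswith_eq, PySem.Chars.startswith_iff] at h hc
  rcases h with ⟨t, ht⟩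
  rcases hc with ⟨u, hu⟩
  have h2 := ht.trans hu.symm
  simp at h2

theorem pvStepA_field (st : List (PySem.Dict String String) × PySem.Dict String String) (raw : String)
    (h : PySem.Str.startswith (PySem.Str.strip raw) "### Task" = false) :
    pvStepA st raw = (st.1, pvFieldB st.2 (PySem.Str.strip raw)) := by
  simp only [pvStepA, pvFieldB]
  split_ifs <;> simp_all

theorem pvStepA_header (st : List (PySem.Dict String String) × PySem.Dict String String) (raw : String)
    (h : PySem.Str.startswith (PySem.Str.strip raw) "### Task" = true) :
    pvStepA st raw = (if st.2.items ≠ [] then st.1 ++ [st.2] else st.1, PySem.Dict.empty) := by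
  have h1 : PySem.Str.startswith (PySem.Str.strip raw) "- **Task ID**:" = false := by
    by_contra hc; rw [Bool.not_eq_false] at hc
    rw [pv_excl_taskid _ hc] at h; exact Bool.false_ne_true h
  have h2 : PySem.Str.startswith (PySem.Str.strip raw) "- **Data URL**:" = false := by
    by_contra hc; rw [Bool.not_eq_false] at hc
    rw [pv_excl_dataurl _ hc] at h; exact Bool.false_ne_true h
  simp only [pvStepA, h, h1, h2]
  simp

theorem pvFoldB_chars (ls : List String) (segs : List (List String)) (cur : List String) :
    (ls.foldl pvStepB (segs, cur)).1 ++ [(ls.foldl pvStepB (segs, cur)).2]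
      = segs ++ pvConsFirst cur (pvSegRec ls) := by
  induction ls generalizing segs cur with
  | nil => simp [pvSegRec, pvConsFirst]
  | cons raw ls ih =>
    simp only [List.foldl_cons, pvStepB, pvSegRec]
    by_cases hh : PySem.Str.startswith (PySem.Str.strip raw) "### Task" = true
    · simp only [hh, if_true, ih]
      cases h : pvSegRec ls with
      | nil => exact absurd h (pvSegRec_ne_nil ls)
      | cons s ss => simp [pvConsFirst]
    · rw [Bool.not_eq_true] at hh
      simp only [hh, Bool.false_eq_true, if_false, ih]
      cases h : pvSegRec ls with
      | nil => exact absurd h (pvSegRec_ne_nil ls)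
      | cons s ss => simp [pvConsFirst]

theorem pvFoldA_chars (ls : List String) (tasks : List (PySem.Dict String String))
    (cur : PySem.Dict String String) :
    (if (ls.foldl pvStepA (tasks, cur)).2.items ≠ [] then
        (ls.foldl pvStepA (tasks, cur)).1 ++ [(ls.foldl pvStepA (tasks, cur)).2]
      else (ls.foldl pvStepA (tasks, cur)).1)
      = tasks ++ (pvMapFirst cur (pvSegRec ls)).filter (fun d => decide (d.items ≠ [])) := by
  induction ls generalizing tasks cur with
  | nil =>
    simp only [List.foldl_nil, pvSegRec, pvMapFirst, List.foldl_nil]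
    by_cases h : cur.items = [] <;> simp [h]
  | cons raw ls ih =>
    by_cases hh : PySem.Str.startswith (PySem.Str.strip raw) "### Task" = true
    · simp only [List.foldl_cons, pvStepA_header _ _ hh, pvSegRec, hh, if_true, ih]
      cases h : pvSegRec ls with
      | nil => exact absurd h (pvSegRec_ne_nil ls)
      | cons s ss =>
        simp only [pvMapFirst, List.foldl_nil, List.filter_cons]
        by_cases hc : cur.items = [] <;>
          by_cases hs : (List.foldl pvFieldB PySem.Dict.empty s).items = [] <;>
            simp [hc, hs, pvParseSegB]
    · rw [Bool.not_eq_true] at hh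
      simp only [List.foldl_cons, pvStepA_field _ _ hh, pvSegRec, hh, Bool.false_eq_true, if_false, ih]
      cases h : pvSegRec ls with
      | nil => exact absurd h (pvSegRec_ne_nil ls)
      | cons s ss => simp [pvConsFirst, pvMapFirst]

-- ===== VERDICT (by name: the statement is the Claim_ definition above) =====
theorem parse_tasks_from_message_spec : Claim_equal_parse_tasks_from_message := by
  intro message _ _
  unfold Spec_parse_tasks_from_message parse_tasks_from_message parse_tasks_from_message_alt pvFinishA pvFinishB
  rw [pvFoldA_chars, pvFoldB_chars]
  cases h : pvSegRec ((PySem.Str.split? message "\n").getD []) with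
  | nil => exact absurd h (pvSegRec_ne_nil _)
  | cons s ss => simp [pvConsFirst, pvMapFirst, pvParseSegB]
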